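-- pv_equiv track=rewrite | github.com/najibmdx/PandaLive | helius_pool_timeline_miner.py | peak_rate_10s
-- ===== SOURCE A (Python) =====
-- from collections import Counter, deque
-- from typing import Any
--
-- def peak_rate_10s(rows: list[dict[str, Any]], side: str) -> int:
--     times = [int(r["ts"]) for r in rows if r["side"] == side]
--     times.sort()
--     dq: deque[int] = deque()
--     peak = 0
--     for t in times:
--         dq.append(t)
--         while dq and t - dq[0] > 10:
--             dq.popleft()
--         if len(dq) > peak:
--             peak = len(dq)
--     return peak
-- ===== SOURCE B (Python) =====
-- def _bisect_left(a, x):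
--     lo, hi = 0, len(a)
--     while lo < hi:
--         mid = (lo + hi) // 2
--         if a[mid] < x:
--             lo = mid + 1
--         else:
--             hi = mid
--     return lo
--
-- def peak_rate_10s(rows, side):
--     times = sorted(int(r["ts"]) for r in rows if r["side"] == side)
--     peak = 0
--     for i in range(len(times)):
--         left = _bisect_left(times, times[i] - 10)
--         peak = max(peak, i - left + 1)
--     return peak
-- ===== Notes on version B (the rewrite author's own statement) =====
-- stated objective: alternative
-- what changed: Replaced A's sliding-window deque (append then pop-front while out of window, tracking the deque's length) with a per-right-endpoint binary search into the sorted timestamp list: the window size at index i is i - bisect_left(times, times[i]-10) + 1, so no window state is maintained.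
import Mathlib
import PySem

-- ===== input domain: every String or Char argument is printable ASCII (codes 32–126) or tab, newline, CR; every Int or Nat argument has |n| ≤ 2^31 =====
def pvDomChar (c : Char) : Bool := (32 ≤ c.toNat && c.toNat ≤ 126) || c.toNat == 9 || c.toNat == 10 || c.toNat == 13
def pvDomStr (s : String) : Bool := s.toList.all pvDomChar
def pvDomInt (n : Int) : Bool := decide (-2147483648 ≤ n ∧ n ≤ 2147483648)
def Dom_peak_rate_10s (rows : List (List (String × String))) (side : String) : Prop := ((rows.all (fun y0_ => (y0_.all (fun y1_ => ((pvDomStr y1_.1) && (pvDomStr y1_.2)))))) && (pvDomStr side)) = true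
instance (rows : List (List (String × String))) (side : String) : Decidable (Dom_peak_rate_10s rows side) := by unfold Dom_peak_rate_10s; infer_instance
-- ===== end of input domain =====

-- B replaces A's sliding-window deque with a per-index binary search (bisect_left) into the
-- sorted timestamp list; same cost class, no window state ("alternative" objective).

-- ===== PORT A =====
-- [int(r["ts"]) for r in rows if r["side"] == side]  (lookups total under Pre_; getD defaults never fire there)
def pvTimesA (rows : List (List (String × String))) (side : String) : List Int :=
  rows.filterMap (fun r =>
    if (PySem.Dict.mk r).get? "side" == some side then
      some ((((PySem.Dict.mk r).get? "ts").bind PySem.Int.ofStr?).getD 0)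
    else none)

-- 'while dq and t - dq[0] > 10: dq.popleft()'
def pvPopA (t : Int) : List Int → List Int
  | [] => []
  | x :: xs => if t - x > 10 then pvPopA t xs else x :: xs

-- loop body: dq.append(t); pop-front while out of window; update peak
def pvStepA (s : List Int × Int) (t : Int) : List Int × Int :=
  let dq := pvPopA t (s.1 ++ [t])
  (dq, if (dq.length : Int) > s.2 then (dq.length : Int) else s.2)

def peak_rate_10s (rows : List (List (String × String))) (side : String) : Int :=
  let times := PySem.List.sorted (pvTimesA rows side) (fun x => x)
  (times.foldl pvStepA ([], 0)).2

-- ===== PORT B =====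
def pvTimesB (rows : List (List (String × String))) (side : String) : List Int :=
  rows.filterMap (fun r =>
    if (PySem.Dict.mk r).get? "side" == some side then
      some ((((PySem.Dict.mk r).get? "ts").bind PySem.Int.ofStr?).getD 0)
    else none)

-- Source B's hand-written _bisect_left is the standard lo/hi binary-search loop, which is exactly
-- PySem.List.bisectLeft (the same fueled lo/hi midpoint loop).
def peak_rate_10s_alt (rows : List (List (String × String))) (side : String) : Int :=
  let times := PySem.List.sorted (pvTimesB rows side) (fun x => x)
  (List.range times.length).foldl
    (fun peak i =>
      let left := PySem.List.bisectLeft times (times.getD i 0 - 10)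
      max peak ((i : Int) - (left : Int) + 1))
    0

-- ===== PRECONDITION & SPEC =====
-- Pre_ excludes exactly the inputs where the Python A raises: a row without a "side" key
-- (KeyError), or a side-matching row whose "ts" is missing (KeyError) or not int()-parseable
-- (ValueError).
def Pre_peak_rate_10s (rows : List (List (String × String))) (side : String) : Prop :=
  ∀ r ∈ rows, ((PySem.Dict.mk r).get? "side").isSome = true ∧
    ((PySem.Dict.mk r).get? "side" = some side →
      (((PySem.Dict.mk r).get? "ts").bind PySem.Int.ofStr?).isSome = true)
instance (rows : List (List (String × String))) (side : String) : Decidable (Pre_peak_rate_10s rows side) := by unfold Pre_peak_rate_10s; infer_instance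

def pvWitness_peak_rate_10s : (List (List (String × String))) × String :=
  ([[("side", "buy"), ("ts", "5")], [("side", "sell"), ("ts", "7")], [("side", "buy"), ("ts", "12")]], "buy")

def Spec_peak_rate_10s (rows : List (List (String × String))) (side : String) (out : Int) : Prop := out = peak_rate_10s_alt rows side
instance (rows : List (List (String × String))) (side : String) (out : Int) : Decidable (Spec_peak_rate_10s rows side out) := by unfold Spec_peak_rate_10s; infer_instance

-- ===== CLAIM (what is proved, stated in full; the proofs are below) =====
def Claim_equal_peak_rate_10s : Prop := ∀ (rows : List (List (String × String))) (side : String), Dom_peak_rate_10s rows side → Pre_peak_rate_10s rows side → Spec_peak_rate_10s rows side (peak_rate_10s rows side)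

-- ===== LEMMAS AND PROOFS =====

-- the A-side while loop is dropWhile, and on a ≤-sorted list it is a filter
theorem pvPopA_sorted_eq_filter (t : Int) (s : List Int) (hs : s.Pairwise (· ≤ ·)) :
    pvPopA t s = s.filter (fun x => decide (t - 10 ≤ x)) := by
  induction s with
  | nil => rfl
  | cons a s ih =>
    rcases List.pairwise_cons.mp hs with ⟨ha, hs'⟩
    by_cases h : t - a > 10
    · simp only [pvPopA, if_pos h]
      rw [ih hs', List.filter_cons_of_neg (by simp; omega)]
    · have hself : s.filter (fun x => decide (t - 10 ≤ x)) = s := by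
        apply List.filter_eq_self.mpr
        intro b hb
        have := ha b hb
        simp; omega
      simp only [pvPopA, if_neg h]
      rw [List.filter_cons_of_pos (by simp; omega), hself]

-- bisect_left on a sorted list counts the elements < x
theorem bisectLeft_eq_countP (l : List Int) (x : Int) (hs : l.Pairwise (· ≤ ·)) :
    PySem.List.bisectLeft l x = l.countP (fun y => decide (y < x)) := by
  obtain ⟨hble, hlt, hge⟩ := PySem.List.bisectLeft_spec l x hs
  set b := PySem.List.bisectLeft l x with hb
  have hsplit : l = l.take b ++ l.drop b := (List.take_append_drop b l).symm
  have h1 : (l.take b).countP (fun y => decide (y < x)) = (l.take b).length := by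
    apply List.countP_eq_length.mpr
    intro a ha
    obtain ⟨j, hj, rfl⟩ := List.mem_iff_getElem.mp ha
    have hjb : j < b := lt_of_lt_of_le hj (by simp)
    have hjl : j < l.length := lt_of_lt_of_le hjb hble
    have := hlt j hjl hjb
    simp only [List.getElem_take]
    simpa using this
  have h2 : (l.drop b).countP (fun y => decide (y < x)) = 0 := by
    apply List.countP_eq_zero.mpr
    intro a ha
    obtain ⟨j, hj, rfl⟩ := List.mem_iff_getElem.mp ha
    rw [List.getElem_drop]
    have hjl : b + j < l.length := by
      have := hj; rw [List.length_drop] at this; omega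
    have := hge (b + j) hjl (by omega)
    simp; omega
  calc b = (l.take b).length := by simp [List.length_take]; omega
    _ = l.countP (fun y => decide (y < x)) := by
        conv_rhs => rw [hsplit]
        rw [List.countP_append, h1, h2]
        omega

-- complement count
theorem countP_lt_add_countP_ge (l : List Int) (c : Int) :
    l.countP (fun y => decide (y < c)) + l.countP (fun y => decide (c ≤ y)) = l.length := by
  induction l with
  | nil => rfl
  | cons a l ih =>
    simp only [List.countP_cons, List.length_cons]
    by_cases h : a < c
    · rw [if_pos (by simpa using h), if_neg (by simp; omega)]; omega
    · rw [if_neg (by simpa using h), if_pos (by simp; omega)]; omega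

-- the window size as B computes it, written with countP
def pvW (l : List Int) (i : Nat) : Int :=
  (i : Int) - (l.countP (fun y => decide (y < l.getD i 0 - 10)) : Int) + 1

-- the A-side loop state after consuming a ≤-sorted list l
theorem pvW_append (m : List Int) (t : Int) (hmt : ∀ a ∈ m, a ≤ t)
    (i : Nat) (hi : i < m.length) : pvW (m ++ [t]) i = pvW m i := by
  unfold pvW
  rw [List.getD_append _ _ _ _ hi, List.countP_append]
  have hv : m.getD i 0 = m[i] := List.getD_eq_getElem _ _ hi
  have hmem := hmt m[i] (List.getElem_mem hi)
  have h0 : List.countP (fun y => decide (y < m.getD i 0 - 10)) [t] = 0 := by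
    rw [hv]
    simp
    omega
  rw [h0]
  push_cast
  omega

theorem ite_gt_eq_max (a b : Int) : (if a > b then a else b) = max b a := by
  rw [max_def]; split_ifs <;> omega

theorem loopA_invariant (l : List Int) (hs : l.Pairwise (· ≤ ·)) :
    l.foldl pvStepA ([], 0)
    = (l.filter (fun x => decide (l.getLast?.getD 0 - 10 ≤ x)),
       (List.range l.length).foldl (fun p i => max p (pvW l i)) 0) := by
  induction l using List.reverseRecOn with
  | nil => rfl
  | append_singleton m t ih =>
    rcases List.pairwise_append.mp hs with ⟨hm, -, hmt⟩
    have hmt' : ∀ a ∈ m, a ≤ t := fun a ha => hmt a ha t (by simp)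
    rw [List.foldl_append, ih hm, List.foldl_cons, List.foldl_nil]
    -- the deque after this step
    have hsorted_dq :
        (m.filter (fun x => decide (m.getLast?.getD 0 - 10 ≤ x)) ++ [t]).Pairwise (· ≤ ·) := by
      rw [List.pairwise_append]
      refine ⟨hm.filter _, by simp, ?_⟩
      intro a ha b hb
      simp only [List.mem_singleton] at hb
      subst hb
      exact hmt' a (List.mem_of_mem_filter ha)
    have hpop : pvPopA t (m.filter (fun x => decide (m.getLast?.getD 0 - 10 ≤ x)) ++ [t])
        = (m ++ [t]).filter (fun x => decide (t - 10 ≤ x)) := by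
      rw [pvPopA_sorted_eq_filter _ _ hsorted_dq, List.filter_append, List.filter_append,
        List.filter_filter]
      congr 1
      · apply List.filter_congr
        intro x hx
        have hne : m ≠ [] := List.ne_nil_of_mem hx
        have hlastmem : m.getLast hne ∈ m := List.getLast_mem hne
        have hlast_le : m.getLast?.getD 0 ≤ t := by
          rw [List.getLast?_eq_some_getLast hne]
          exact hmt' _ hlastmem
        by_cases h10 : t - 10 ≤ x
        · simp [h10]
          omega
        · simp [h10]
    have hgetn : (m ++ [t]).getD m.length 0 = t := by
      rw [List.getD_eq_getElem _ _ (by simp)]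
      simp
    -- the new window length is B's window value at index m.length
    have hlenInt : ((((m ++ [t]).filter (fun x => decide (t - 10 ≤ x))).length : Int))
        = pvW (m ++ [t]) m.length := by
      unfold pvW
      rw [hgetn]
      have hcomp := countP_lt_add_countP_ge (m ++ [t]) (t - 10)
      have hle := List.countP_le_length (p := fun y => decide (y < t - 10)) (l := m ++ [t])
      rw [← List.countP_eq_length_filter]
      simp only [List.length_append, List.length_cons, List.length_nil] at hcomp hle
      omega
    -- assemble
    unfold pvStepA
    simp only [hpop, List.getLast?_concat, Option.getD_some, List.length_append,
      List.length_cons, List.length_nil, List.range_succ, List.foldl_append,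
      List.foldl_cons, List.foldl_nil]
    refine Prod.ext rfl ?_
    simp only [hlenInt]
    rw [ite_gt_eq_max,
      PySem.List.foldl_congr_mem (List.range m.length)
        (fun p i => max p (pvW (m ++ [t]) i)) (fun p i => max p (pvW m i)) 0
        (fun acc i hi =>
          show max acc (pvW (m ++ [t]) i) = max acc (pvW m i) by
            rw [pvW_append m t hmt' i (List.mem_range.mp hi)])]

theorem peak_rate_10s_eq_fold (rows : List (List (String × String))) (side : String) :
    peak_rate_10s rows side
      = (List.range (PySem.List.sorted (pvTimesA rows side) (fun x => x)).length).foldl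
          (fun p i => max p (pvW (PySem.List.sorted (pvTimesA rows side) (fun x => x)) i)) 0 := by
  unfold peak_rate_10s
  show (List.foldl pvStepA ([], 0) (PySem.List.sorted (pvTimesA rows side) (fun x => x))).2 = _
  rw [loopA_invariant _ (PySem.List.sorted_pairwise _ _)]

-- ===== VERDICT (by name: the statement is the Claim_ definition above) =====
theorem peak_rate_10s_spec : Claim_equal_peak_rate_10s := by
  intro rows side _ _
  unfold Spec_peak_rate_10s
  rw [peak_rate_10s_eq_fold]
  unfold peak_rate_10s_alt
  show _ = (List.range (PySem.List.sorted (pvTimesB rows side) (fun x => x)).length).foldl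
      (fun (peak : Int) (i : Nat) =>
        max peak ((i : Int) - (PySem.List.bisectLeft (PySem.List.sorted (pvTimesB rows side) (fun x => x))
          ((PySem.List.sorted (pvTimesB rows side) (fun x => x)).getD i 0 - 10) : Int) + 1)) 0
  have hTB : pvTimesB rows side = pvTimesA rows side := rfl
  rw [hTB]
  refine PySem.List.foldl_congr_mem _ _ _ 0 (fun acc i hi => ?_)
  show max acc (pvW (PySem.List.sorted (pvTimesA rows side) (fun x => x)) i) = _
  unfold pvW
  rw [bisectLeft_eq_countP _ _ (PySem.List.sorted_pairwise _ _)]
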